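-- pv_equiv track=rewrite | github.com/morph-kgc/morph-kgc | src/morph_kgc/data_source/relational_database.py | _replace_query_enclosing_characters
-- ===== SOURCE A (Python) =====
-- def _replace_query_enclosing_characters(sql_query, db_dialect):
--     db_dialect = db_dialect.upper()
--     dialect_sql_query = ''
--
--     if db_dialect in ['MYSQL', 'MARIADB']:
--         dialect_sql_query = sql_query   # the query already uses backticks as enclosed characters
--     elif db_dialect == 'MSSQL':
--         # replace backticks with square brackets
--         square_brackets = ['[', ']']
--         num_enclosing_char = 0
--         for char in sql_query:
--             if char == '`':
--                 dialect_sql_query = dialect_sql_query + square_brackets[num_enclosing_char % 2]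
--                 num_enclosing_char += 1
--             else:
--                 dialect_sql_query = dialect_sql_query + char
--     else:
--         # replace backticks with double quotes
--         dialect_sql_query = sql_query.replace('`', '"')
--
--     return dialect_sql_query
-- ===== SOURCE B (Python) =====
-- def _replace_query_enclosing_characters(sql_query, db_dialect):
--     db_dialect = db_dialect.upper()
--     if db_dialect in ('MYSQL', 'MARIADB'):
--         return sql_query
--     if db_dialect == 'MSSQL':
--         parts = sql_query.split('`')
--         out = parts[0]
--         for i, seg in enumerate(parts[1:]):
--             out += ('[' if i % 2 == 0 else ']') + seg
--         return out
--     return sql_query.replace('`', '"')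
-- ===== Notes on version B (the rewrite author's own statement) =====
-- stated objective: idiomatic
-- what changed: The MSSQL branch's char-by-char scan with an open/close counter is replaced by splitting the query on backticks once and reassembling the segments with alternating brackets chosen by segment index parity.
import Mathlib
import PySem

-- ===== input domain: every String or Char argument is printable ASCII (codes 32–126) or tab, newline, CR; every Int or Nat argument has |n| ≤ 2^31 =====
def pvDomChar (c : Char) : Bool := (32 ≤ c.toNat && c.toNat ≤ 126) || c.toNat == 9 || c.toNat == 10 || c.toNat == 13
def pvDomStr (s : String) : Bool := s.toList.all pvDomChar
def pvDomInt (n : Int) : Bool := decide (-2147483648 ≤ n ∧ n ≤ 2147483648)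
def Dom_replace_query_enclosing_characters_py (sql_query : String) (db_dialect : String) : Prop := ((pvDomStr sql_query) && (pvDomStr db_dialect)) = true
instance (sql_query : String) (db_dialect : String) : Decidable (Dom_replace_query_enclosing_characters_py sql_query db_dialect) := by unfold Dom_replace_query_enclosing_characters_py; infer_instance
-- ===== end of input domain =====

-- B replaces the MSSQL char-by-char counter scan by split-on-backtick then reassembly with
-- index-parity brackets (idiomatic decomposition; same linear cost).


-- ===== PORT A =====
-- the char loop: state = (accumulated output chars, number of enclosing chars seen)
def replace_query_enclosing_characters_py (sql_query : String) (db_dialect : String) : String :=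
  let dd := PySem.Str.upper db_dialect
  if dd = "MYSQL" ∨ dd = "MARIADB" then
    sql_query
  else if dd = "MSSQL" then
    let st := sql_query.toList.foldl
      (fun (st : List Char × Nat) c =>
        if c = '`' then
          (st.1 ++ [if st.2 % 2 = 0 then '[' else ']'], st.2 + 1)
        else
          (st.1 ++ [c], st.2))
      ([], 0)
    String.mk st.1
  else
    PySem.Str.replace sql_query "`" "\""

-- ===== PORT B =====
-- split('`') with a one-char separator is List.splitOn '`' on the code points;
-- parts[0] is headD [] (split never returns an empty list), parts[1:] is drop 1.
def replace_query_enclosing_characters_py_alt (sql_query : String) (db_dialect : String) : String :=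
  let dd := PySem.Str.upper db_dialect
  if dd = "MYSQL" ∨ dd = "MARIADB" then
    sql_query
  else if dd = "MSSQL" then
    let parts := sql_query.toList.splitOn '`'
    String.mk ((PySem.List.enumerate (parts.drop 1) 0).foldl
      (fun out p => out ++ (if PySem.Int.mod p.1 2 = 0 then '[' else ']') :: p.2)
      (parts.headD []))
  else
    PySem.Str.replace sql_query "`" "\""

-- ===== PRECONDITION & SPEC =====
def Spec_replace_query_enclosing_characters_py (sql_query : String) (db_dialect : String) (out : String) : Prop := out = replace_query_enclosing_characters_py_alt sql_query db_dialect
instance (sql_query : String) (db_dialect : String) (out : String) : Decidable (Spec_replace_query_enclosing_characters_py sql_query db_dialect out) := by unfold Spec_replace_query_enclosing_characters_py; infer_instance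

-- ===== CLAIM (what is proved, stated in full; the proofs are below) =====
def Claim_equal_replace_query_enclosing_characters_py : Prop := ∀ (sql_query : String) (db_dialect : String), Dom_replace_query_enclosing_characters_py sql_query db_dialect → Spec_replace_query_enclosing_characters_py sql_query db_dialect (replace_query_enclosing_characters_py sql_query db_dialect)

-- ===== LEMMAS AND PROOFS =====

-- A's loop body, abstracted
def pvStepA (st : List Char × Nat) (c : Char) : List Char × Nat :=
  if c = '`' then (st.1 ++ [if st.2 % 2 = 0 then '[' else ']'], st.2 + 1)
  else (st.1 ++ [c], st.2)

-- what A's scan appends, as a structural recursion over the input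
def pvScan (n : Nat) : List Char → List Char
  | [] => []
  | c :: cs => if c = '`' then (if n % 2 = 0 then '[' else ']') :: pvScan (n + 1) cs
               else c :: pvScan n cs

-- reassembly of the segments after the first, with Nat indices
def pvJoin (n : Nat) : List (List Char) → List Char
  | [] => []
  | s :: r => (if n % 2 = 0 then '[' else ']') :: s ++ pvJoin (n + 1) r

theorem pvFoldA_eq (cs : List Char) : ∀ (acc : List Char) (n : Nat),
    cs.foldl pvStepA (acc, n) = (acc ++ pvScan n cs, n + cs.count '`') := by
  induction cs with
  | nil => intro acc n; simp [pvScan]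
  | cons c cs ih =>
    intro acc n
    by_cases h : c = '`' <;>
      simp [pvStepA, pvScan, h, ih, Nat.add_assoc, Nat.add_comm 1]

theorem pvFoldB_eq (rest : List (List Char)) : ∀ (init : List Char) (n : Nat),
    (PySem.List.enumerate rest (n : Int)).foldl
      (fun out p => out ++ (if PySem.Int.mod p.1 2 = 0 then '[' else ']') :: p.2) init
      = init ++ pvJoin n rest := by
  induction rest with
  | nil => intro init n; simp [PySem.List.enumerate, pvJoin]
  | cons s r ih =>
    intro init n
    have hmod : PySem.Int.mod (n : Int) 2 = ((n % 2 : Nat) : Int) := by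
      simp [PySem.Int.mod, Int.fmod_eq_emod]
    have hn1 : ((n : Int) + 1) = ((n + 1 : Nat) : Int) := by push_cast; ring
    simp only [PySem.List.enumerate, List.foldl_cons, hn1, ih, pvJoin, hmod]
    by_cases h : n % 2 = 0 <;> simp [h] <;> omega

theorem pvSplitOn_ne_nil (cs : List Char) : cs.splitOn '`' ≠ [] := by
  simpa [List.splitOn] using List.splitOnP_ne_nil (fun c => c == '`') cs

theorem pvScan_eq_join (cs : List Char) : ∀ (n : Nat),
    pvScan n cs = (cs.splitOn '`').headD [] ++ pvJoin n ((cs.splitOn '`').drop 1) := by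
  induction cs with
  | nil => intro n; simp [pvScan, List.splitOn, pvJoin]
  | cons c cs ih =>
    intro n
    obtain ⟨q, qs, hq⟩ : ∃ q qs, cs.splitOn '`' = q :: qs := by
      cases h : cs.splitOn '`' with
      | nil => exact absurd h (pvSplitOn_ne_nil cs)
      | cons q qs => exact ⟨q, qs, rfl⟩
    by_cases h : c = '`'
    · have hcons : ('`' :: cs).splitOn '`' = [] :: cs.splitOn '`' := by
        simp [List.splitOn, List.splitOnP_cons]
      subst h
      simp [pvScan, hcons, hq, pvJoin]
      simpa [hq] using ih (n + 1)
    · have hcons : (c :: cs).splitOn '`' = (cs.splitOn '`').modifyHead (List.cons c) := by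
        simp [List.splitOn, List.splitOnP_cons, h]
      simp [pvScan, h, hcons, hq, ih n]

theorem pvBranch_eq (sq : String) :
    String.mk (sq.toList.foldl pvStepA ([], 0)).1
      = String.mk ((PySem.List.enumerate ((sq.toList.splitOn '`').drop 1) 0).foldl
          (fun out p => out ++ (if PySem.Int.mod p.1 2 = 0 then '[' else ']') :: p.2)
          ((sq.toList.splitOn '`').headD [])) := by
  congr 1
  rw [pvFoldA_eq]
  dsimp only
  have hB := pvFoldB_eq ((sq.toList.splitOn '`').drop 1) ((sq.toList.splitOn '`').headD []) 0
  rw [Nat.cast_zero] at hB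
  rw [hB, pvScan_eq_join]
  simp

-- ===== VERDICT (by name: the statement is the Claim_ definition above) =====
theorem replace_query_enclosing_characters_py_spec : Claim_equal_replace_query_enclosing_characters_py := by
  intro sql_query db_dialect _
  unfold Spec_replace_query_enclosing_characters_py
  simp only [replace_query_enclosing_characters_py, replace_query_enclosing_characters_py_alt]
  by_cases h1 : PySem.Str.upper db_dialect = "MYSQL" ∨ PySem.Str.upper db_dialect = "MARIADB"
  · rw [if_pos h1, if_pos h1]
  · by_cases h2 : PySem.Str.upper db_dialect = "MSSQL"
    · rw [if_neg h1, if_neg h1, if_pos h2, if_pos h2]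
      exact pvBranch_eq sql_query
    · rw [if_neg h1, if_neg h1, if_neg h2, if_neg h2]
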